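-- pv_equiv track=rewrite | github.com/clubPenguin420/AdventOfCode2020 | Day 7/Part Two/D7P2.py | solve
-- ===== SOURCE A (Python) =====
-- def solve(d):
--     seen = {}
--
--     def count(color):
--         if color in seen:
--             return seen[color]
--         if color not in d or not d[color]:
--             return 1
--
--         amount = 0
--
--         for pair in d[color]:
--             val = count(pair[1])
--             if val > 1:
--                 val += 1
--             amount += pair[0] * val
--
--
--         seen[color] = amount
--         return amount
--
--     return count("shiny gold") + 76
-- ===== SOURCE B (Python) =====
-- def solve(d):
--     val = {}
--     for _ in range(len(d)):
--         new = {}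
--         for color, children in d.items():
--             total = 0
--             for amount, child in children:
--                 v = 1 if (child not in d or not d[child]) else val.get(child, 0)
--                 if v > 1:
--                     v += 1
--                 total += amount * v
--             new[color] = total
--         val = new
--     if "shiny gold" not in d or not d["shiny gold"]:
--         return 1 + 76
--     return val.get("shiny gold", 0) + 76
-- ===== Notes on version B (the rewrite author's own statement) =====
-- stated objective: alternative
-- what changed: B replaces A's memoized top-down recursion (a cache dict threaded through recursive count calls) with a bottom-up fixpoint iteration: len(d) Jacobi sweeps each recomputing every bag's total from the previous value table, then one table lookup for 'shiny gold'; B has no recursion and no memo cache.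
-- outside the precondition, e.g. on solve({'shiny gold': [(1, 'shiny gold')]}): A raises RecursionError, B returns 76
import Mathlib
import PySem

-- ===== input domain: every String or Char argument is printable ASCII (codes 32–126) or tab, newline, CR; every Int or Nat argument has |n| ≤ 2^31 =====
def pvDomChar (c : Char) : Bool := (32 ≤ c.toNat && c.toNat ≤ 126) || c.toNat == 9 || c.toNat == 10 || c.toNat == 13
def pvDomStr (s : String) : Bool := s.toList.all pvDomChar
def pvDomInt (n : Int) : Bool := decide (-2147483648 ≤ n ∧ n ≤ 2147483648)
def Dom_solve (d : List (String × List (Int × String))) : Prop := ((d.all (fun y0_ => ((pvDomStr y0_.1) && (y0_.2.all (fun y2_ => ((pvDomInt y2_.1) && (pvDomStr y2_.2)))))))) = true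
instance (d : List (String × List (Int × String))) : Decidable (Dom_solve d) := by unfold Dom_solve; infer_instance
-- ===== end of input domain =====

-- B replaces A's memoized top-down recursion by a bottom-up fixpoint iteration (len(d) Jacobi sweeps
-- over a value table); same return value on every Pre_ input (distinct keys, no cycle reachable
-- from "shiny gold" — A raises RecursionError on reachable cycles, B still returns a value there).

-- ===== PORT A =====
-- first-match lookup in the association list (the Python dict d)
def dget (d : List (String × List (Int × String))) (c : String) : Option (List (Int × String)) :=
  (PySem.Dict.mk d).get? c

mutual
-- def count(color): memoized, threading the cache 'seen'; fuel 0 = none (never reached under Pre_)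
def countA (d : List (String × List (Int × String))) :
    Nat → PySem.Dict String Int → String → Option (Int × PySem.Dict String Int)
  | 0, _, _ => none
  | n+1, seen, color =>
    match seen.get? color with
    | some v => some (v, seen)
    | none =>
      match dget d color with
      | none => some (1, seen)
      | some children =>
        if children = [] then some (1, seen)
        else
          match loopA d n seen children 0 with
          | none => none
          | some (amount, seen') => some (amount, seen'.insert color amount)
-- for pair in d[color]: val = count(pair[1]); if val > 1: val += 1; amount += pair[0] * val
def loopA (d : List (String × List (Int × String))) :
    Nat → PySem.Dict String Int → List (Int × String) → Int → Option (Int × PySem.Dict String Int)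
  | _, seen, [], amount => some (amount, seen)
  | n, seen, p :: rest, amount =>
    match countA d n seen p.2 with
    | none => none
    | some (v, seen') =>
      let val := if v > 1 then v + 1 else v
      loopA d n seen' rest (amount + p.1 * val)
end

def solve (d : List (String × List (Int × String))) : Int :=
  match countA d (d.length + 1) PySem.Dict.empty "shiny gold" with
  | some (v, _) => v + 76
  | none => 0

-- ===== PORT B =====
-- if v > 1: v += 1
def bumpB (v : Int) : Int := if v > 1 then v + 1 else v

-- v = 1 if (child not in d or not d[child]) else val.get(child, 0)
def childValB (d : List (String × List (Int × String))) (val : PySem.Dict String Int)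
    (c : String) : Int :=
  match dget d c with
  | none => 1
  | some ch => if ch = [] then 1 else val.getD c 0

-- the inner 'for amount, child in children' accumulation of one row
def rowB (d : List (String × List (Int × String))) (val : PySem.Dict String Int)
    (children : List (Int × String)) : Int :=
  children.foldl (fun t p => t + p.1 * bumpB (childValB d val p.2)) 0

-- one sweep: new = {color: row(children) for color, children in d.items()}
def sweepB (d : List (String × List (Int × String))) (val : PySem.Dict String Int) :
    PySem.Dict String Int :=
  d.foldl (fun nw p => nw.insert p.1 (rowB d val p.2)) PySem.Dict.empty

-- for _ in range(n): val = sweep(val)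
def iterSweep (d : List (String × List (Int × String))) : Nat → PySem.Dict String Int
  | 0 => PySem.Dict.empty
  | n+1 => sweepB d (iterSweep d n)

def solve_alt (d : List (String × List (Int × String))) : Int :=
  let val := iterSweep d d.length
  (match dget d "shiny gold" with
   | none => 1
   | some ch => if ch = [] then 1 else val.getD "shiny gold" 0) + 76

-- ===== PRECONDITION & SPEC =====
-- the set of colors named as children of c (empty for a non-key)
def kidsF (d : List (String × List (Int × String))) (c : String) : Finset String :=
  (((dget d c).getD []).map Prod.snd).toFinset

def stepF (d : List (String × List (Int × String))) (S : Finset String) : Finset String :=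
  S ∪ S.biUnion (kidsF d)

def iterF (d : List (String × List (Int × String))) : Nat → Finset String → Finset String
  | 0, S => S
  | n+1, S => iterF d n (stepF d S)

def allKids (d : List (String × List (Int × String))) : Finset String :=
  (d.flatMap (fun e => e.2.map Prod.snd)).toFinset

-- forward closure of S under the child relation (enough iterations to reach the fixpoint)
def clF (d : List (String × List (Int × String))) (S : Finset String) : Finset String :=
  iterF d ((allKids d).card + 1) S

def ReachS (d : List (String × List (Int × String))) : Finset String :=
  clF d {"shiny gold"}

-- Pre_ excludes (a) association lists with duplicate keys, which cannot arise from a Python dict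
-- (first-match order would be accidental), and (b) inputs with a bag cycle reachable from
-- "shiny gold", on which A raises RecursionError; nothing else.
def Pre_solve (d : List (String × List (Int × String))) : Prop :=
  (d.map Prod.fst).Nodup ∧ ∀ c ∈ ReachS d, c ∉ clF d (kidsF d c)
instance (d : List (String × List (Int × String))) : Decidable (Pre_solve d) := by
  unfold Pre_solve; infer_instance

def pvWitness_solve : (List (String × List (Int × String))) :=
  [("shiny gold", [(2, "red")]), ("red", [])]

def Spec_solve (d : List (String × List (Int × String))) (out : Int) : Prop := out = solve_alt d
instance (d : List (String × List (Int × String))) (out : Int) : Decidable (Spec_solve d out) := by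
  unfold Spec_solve; infer_instance

-- ===== CLAIM (what is proved, stated in full; the proofs are below) =====
def Claim_equal_solve : Prop := ∀ (d : List (String × List (Int × String))), Dom_solve d → Pre_solve d → Spec_solve d (solve d)

-- ===== LEMMAS AND PROOFS =====

-- proof-side naive fueled evaluator: the common reference value of both programs
mutual
def cnt (d : List (String × List (Int × String))) : Nat → String → Option Int
  | 0, _ => none
  | n+1, c =>
    match dget d c with
    | none => some 1
    | some ch => if ch = [] then some 1 else cntL d n ch 0
def cntL (d : List (String × List (Int × String))) :
    Nat → List (Int × String) → Int → Option Int
  | _, [], t => some t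
  | n, p :: rest, t =>
    match cnt d n p.2 with
    | none => none
    | some v => cntL d n rest (t + p.1 * bumpB v)
end

def keysF (d : List (String × List (Int × String))) : Finset String :=
  (d.map Prod.fst).toFinset

-- the key-count measure driving every induction
def mC (d : List (String × List (Int × String))) (c : String) : Nat :=
  ((clF d {c}) ∩ keysF d).card

def Vv (d : List (String × List (Int × String))) (c : String) : Int :=
  (cnt d (mC d c + 1) c).getD 0

theorem dget_mem (d : List (String × List (Int × String))) (c : String)
    (l : List (Int × String)) (h : dget d c = some l) : (c, l) ∈ d := by
  induction d with
  | nil =>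
    exfalso
    unfold dget at h
    rw [(PySem.Dict.get?_eq_none_iff_not_mem_keys (PySem.Dict.mk ([] : List (String × List (Int × String)))) c).mpr (by simp [PySem.Dict.keys])] at h
    simp at h
  | cons e rest ih =>
    obtain ⟨k, v⟩ := e
    unfold dget at h
    rw [PySem.Dict.get?_mk_cons] at h
    by_cases he : k = c
    · subst he
      simp only [BEq.rfl, if_pos] at h
      cases h
      exact List.mem_cons_self ..
    · rw [show (k == c) = false by simpa using he] at h
      simp only [Bool.false_eq_true, if_neg, not_false_iff] at h
      exact List.mem_cons_of_mem _ (ih h)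

theorem key_of_dget (d : List (String × List (Int × String))) (c : String)
    (l : List (Int × String)) (h : dget d c = some l) : c ∈ keysF d := by
  unfold keysF
  rw [List.mem_toFinset, List.mem_map]
  exact ⟨(c, l), dget_mem d c l h, rfl⟩

theorem kidsF_subset_allKids (d : List (String × List (Int × String))) (c : String) :
    kidsF d c ⊆ allKids d := by
  intro x hx
  unfold kidsF at hx
  unfold allKids
  rw [List.mem_toFinset] at hx ⊢
  cases hdg : dget d c with
  | none => rw [hdg] at hx; simp at hx
  | some l =>
    rw [hdg] at hx
    simp only [Option.getD_some] at hx
    rw [List.mem_flatMap]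
    exact ⟨(c, l), dget_mem d c l hdg, hx⟩

theorem subset_stepF (d : List (String × List (Int × String))) (S : Finset String) :
    S ⊆ stepF d S := Finset.subset_union_left

theorem subset_iterF (d : List (String × List (Int × String))) :
    ∀ n S, S ⊆ iterF d n S := by
  intro n
  induction n with
  | zero => intro S; exact subset_refl S
  | succ n ih => intro S; exact (subset_stepF d S).trans (ih (stepF d S))

theorem iterF_subset_union (d : List (String × List (Int × String))) :
    ∀ n S, iterF d n S ⊆ S ∪ allKids d := by
  intro n
  induction n with
  | zero => intro S; exact Finset.subset_union_left
  | succ n ih =>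
    intro S
    refine (ih (stepF d S)).trans ?_
    apply Finset.union_subset _ Finset.subset_union_right
    apply Finset.union_subset Finset.subset_union_left
    intro x hx
    rw [Finset.mem_biUnion] at hx
    obtain ⟨c, _, hx⟩ := hx
    exact Finset.mem_union_right _ (kidsF_subset_allKids d c hx)

def ClosedF (d : List (String × List (Int × String))) (S : Finset String) : Prop :=
  ∀ c ∈ S, kidsF d c ⊆ S

theorem stepF_eq_of_closed (d : List (String × List (Int × String))) (S : Finset String)
    (h : ClosedF d S) : stepF d S = S := by
  unfold stepF
  rw [Finset.union_eq_left]
  intro x hx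
  rw [Finset.mem_biUnion] at hx
  obtain ⟨c, hc, hx⟩ := hx
  exact h c hc hx

theorem closed_of_stepF_eq (d : List (String × List (Int × String))) (S : Finset String)
    (h : stepF d S = S) : ClosedF d S := by
  intro c hc x hx
  rw [← h]
  exact Finset.mem_union_right _ (Finset.mem_biUnion.mpr ⟨c, hc, hx⟩)

theorem iterF_of_closed (d : List (String × List (Int × String))) :
    ∀ n S, ClosedF d S → iterF d n S = S := by
  intro n
  induction n with
  | zero => intro S _; rfl
  | succ n ih =>
    intro S h
    show iterF d n (stepF d S) = S
    rw [stepF_eq_of_closed d S h]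
    exact ih S h

theorem iterF_growth (d : List (String × List (Int × String))) :
    ∀ n S, ClosedF d (iterF d n S) ∨ S.card + n ≤ (iterF d n S).card := by
  intro n
  induction n with
  | zero => intro S; right; show S.card + 0 ≤ S.card; omega
  | succ n ih =>
    intro S
    by_cases h : stepF d S = S
    · left
      show ClosedF d (iterF d n (stepF d S))
      rw [h, iterF_of_closed d n S (closed_of_stepF_eq d S h)]
      exact closed_of_stepF_eq d S h
    · have hlt : S.card < (stepF d S).card :=
        Finset.card_lt_card (Finset.ssubset_iff_subset_ne.mpr ⟨subset_stepF d S, fun he => h he.symm⟩)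
      rcases ih (stepF d S) with hc | hcard
      · left; exact hc
      · right
        show S.card + (n + 1) ≤ (iterF d n (stepF d S)).card
        omega

theorem clF_closed (d : List (String × List (Int × String))) (S : Finset String) :
    ClosedF d (clF d S) := by
  rcases iterF_growth d ((allKids d).card + 1) S with h | h
  · exact h
  · exfalso
    have h1 : (iterF d ((allKids d).card + 1) S).card ≤ (S ∪ allKids d).card :=
      Finset.card_le_card (iterF_subset_union d _ S)
    have h2 : (S ∪ allKids d).card ≤ S.card + (allKids d).card := Finset.card_union_le _ _
    omega

theorem iterF_subset_of_closed (d : List (String × List (Int × String))) (X : Finset String)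
    (hX : ClosedF d X) : ∀ n S, S ⊆ X → iterF d n S ⊆ X := by
  intro n
  induction n with
  | zero => intro S h; exact h
  | succ n ih =>
    intro S h
    apply ih
    apply Finset.union_subset h
    intro x hx
    rw [Finset.mem_biUnion] at hx
    obtain ⟨c, hc, hx⟩ := hx
    exact hX c (h hc) hx

theorem subset_clF (d : List (String × List (Int × String))) (S : Finset String) :
    S ⊆ clF d S := subset_iterF d _ S

theorem clF_min (d : List (String × List (Int × String))) (S X : Finset String)
    (hX : ClosedF d X) (h : S ⊆ X) : clF d S ⊆ X :=
  iterF_subset_of_closed d X hX _ S h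

theorem mem_kidsF (d : List (String × List (Int × String))) (c : String)
    (ch : List (Int × String)) (hdg : dget d c = some ch) (p : Int × String) (hp : p ∈ ch) :
    p.2 ∈ kidsF d c := by
  unfold kidsF
  rw [hdg]
  simp only [Option.getD_some, List.mem_toFinset, List.mem_map]
  exact ⟨p, hp, rfl⟩

theorem child_mem_clF (d : List (String × List (Int × String))) (S : Finset String) (c : String)
    (hc : c ∈ clF d S) (ch : List (Int × String)) (hdg : dget d c = some ch)
    (p : Int × String) (hp : p ∈ ch) : p.2 ∈ clF d S :=
  clF_closed d S c hc (mem_kidsF d c ch hdg p hp)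

-- the measure strictly decreases from a reachable key to any of its children
theorem meas_child_lt (d : List (String × List (Int × String))) (hpre : Pre_solve d)
    (c : String) (hc : c ∈ ReachS d) (ch : List (Int × String)) (hdg : dget d c = some ch)
    (p : Int × String) (hp : p ∈ ch) : mC d p.2 < mC d c := by
  have hck : c ∈ keysF d := key_of_dget d c ch hdg
  have hcm : c ∈ clF d {c} := subset_clF d {c} (Finset.mem_singleton_self c)
  have hkid : p.2 ∈ kidsF d c := mem_kidsF d c ch hdg p hp
  have hpc : p.2 ∈ clF d {c} := clF_closed d {c} c hcm hkid
  have hsub : clF d {p.2} ⊆ clF d {c} :=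
    clF_min d {p.2} (clF d {c}) (clF_closed d {c}) (Finset.singleton_subset_iff.mpr hpc)
  have hnc : c ∉ clF d {p.2} := by
    intro hmem
    apply hpre.2 c hc
    have hsub2 : clF d {p.2} ⊆ clF d (kidsF d c) :=
      clF_min d {p.2} _ (clF_closed d _)
        (Finset.singleton_subset_iff.mpr (subset_clF d _ hkid))
    exact hsub2 hmem
  have hsubI : (clF d {p.2} ∩ keysF d) ⊆ (clF d {c} ∩ keysF d) :=
    Finset.inter_subset_inter hsub (subset_refl _)
  apply Finset.card_lt_card
  rw [Finset.ssubset_iff_of_subset hsubI]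
  exact ⟨c, Finset.mem_inter.mpr ⟨hcm, hck⟩, fun hmem => hnc (Finset.mem_inter.mp hmem).1⟩

theorem meas_le (d : List (String × List (Int × String))) (c : String) :
    mC d c ≤ d.length := by
  unfold mC
  calc ((clF d {c}) ∩ keysF d).card ≤ (keysF d).card :=
        Finset.card_le_card Finset.inter_subset_right
    _ ≤ (d.map Prod.fst).length := List.toFinset_card_le _
    _ = d.length := List.length_map ..

theorem meas_pos_of_key (d : List (String × List (Int × String))) (c : String)
    (ch : List (Int × String)) (hdg : dget d c = some ch) : 1 ≤ mC d c := by
  have : c ∈ (clF d {c}) ∩ keysF d :=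
    Finset.mem_inter.mpr ⟨subset_clF d {c} (Finset.mem_singleton_self c), key_of_dget d c ch hdg⟩
  exact Finset.card_pos.mpr ⟨c, this⟩

-- cntL evaluates to a foldl when every child's value is pinned
theorem cntL_eval (d : List (String × List (Int × String))) (n : Nat) :
    ∀ (l : List (Int × String)), (∀ p ∈ l, cnt d n p.2 = some (Vv d p.2)) →
    ∀ t, cntL d n l t = some (l.foldl (fun t p => t + p.1 * bumpB (Vv d p.2)) t) := by
  intro l
  induction l with
  | nil => intro _ t; simp [cntL]
  | cons p rest ih =>
    intro h t
    simp only [cntL, h p (by simp), List.foldl_cons]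
    exact ih (fun q hq => h q (by simp [hq])) _

theorem cnt_eval (d : List (String × List (Int × String))) (hpre : Pre_solve d) :
    ∀ r c, c ∈ ReachS d → mC d c ≤ r → ∀ n, mC d c < n → cnt d n c = some (Vv d c) := by
  intro r
  induction r with
  | zero =>
    intro c _ hr n hn
    obtain ⟨n', rfl⟩ : ∃ n', n = n' + 1 := ⟨n - 1, by omega⟩
    cases hdg : dget d c with
    | none => simp [cnt, Vv, hdg]
    | some ch => exact absurd (meas_pos_of_key d c ch hdg) (by omega)
  | succ r ih =>
    intro c hc hr n hn
    obtain ⟨n', rfl⟩ : ∃ n', n = n' + 1 := ⟨n - 1, by omega⟩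
    cases hdg : dget d c with
    | none => simp [cnt, Vv, hdg]
    | some ch =>
      by_cases hch : ch = []
      · simp [cnt, hch, Vv, hdg]
      · have hkids : ∀ m, mC d c ≤ m → ∀ p ∈ ch, cnt d m p.2 = some (Vv d p.2) := by
          intro m hm p hp
          have hlt := meas_child_lt d hpre c hc ch hdg p hp
          exact ih p.2 (child_mem_clF d _ c hc ch hdg p hp) (by omega) m (by omega)
        have h1 : cnt d (n' + 1) c = cntL d n' ch 0 := by simp [cnt, hdg, hch]
        have h2 : cnt d (mC d c + 1) c = cntL d (mC d c) ch 0 := by simp [cnt, hdg, hch]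
        rw [h1, cntL_eval d n' ch (hkids n' (by omega)) 0]
        unfold Vv
        rw [h2, cntL_eval d (mC d c) ch (hkids (mC d c) (le_refl _)) 0]
        rfl

theorem Vv_leaf (d : List (String × List (Int × String))) (c : String)
    (h : dget d c = none) : Vv d c = 1 := by simp [Vv, cnt, h]

theorem Vv_nil (d : List (String × List (Int × String))) (c : String)
    (h : dget d c = some []) : Vv d c = 1 := by simp [Vv, cnt, h]

theorem Vv_key (d : List (String × List (Int × String))) (hpre : Pre_solve d)
    (c : String) (hc : c ∈ ReachS d) (ch : List (Int × String)) (hdg : dget d c = some ch)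
    (hch : ch ≠ []) :
    Vv d c = ch.foldl (fun t p => t + p.1 * bumpB (Vv d p.2)) 0 := by
  have hkids : ∀ p ∈ ch, cnt d (mC d c) p.2 = some (Vv d p.2) := by
    intro p hp
    have hlt := meas_child_lt d hpre c hc ch hdg p hp
    exact cnt_eval d hpre (mC d p.2) p.2 (child_mem_clF d _ c hc ch hdg p hp)
      (le_refl _) (mC d c) hlt
  unfold Vv
  have h2 : cnt d (mC d c + 1) c = cntL d (mC d c) ch 0 := by simp [cnt, hdg, hch]
  rw [h2, cntL_eval d (mC d c) ch hkids 0]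
  rfl

-- ===== A side =====

def InvSeen (d : List (String × List (Int × String))) (seen : PySem.Dict String Int) : Prop :=
  ∀ c v, seen.get? c = some v → c ∈ ReachS d ∧ v = Vv d c

theorem A_main (d : List (String × List (Int × String))) (hpre : Pre_solve d) :
    ∀ r c n seen, c ∈ ReachS d → mC d c ≤ r → mC d c < n → InvSeen d seen →
      ∃ seen', countA d n seen c = some (Vv d c, seen') ∧ InvSeen d seen' := by
  intro r
  induction r with
  | zero =>
    intro c n seen hc hr hn hinv
    obtain ⟨n', rfl⟩ : ∃ n', n = n' + 1 := ⟨n - 1, by omega⟩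
    cases hsc : seen.get? c with
    | some v =>
      exact ⟨seen, by simp [countA, hsc, (hinv c v hsc).2], hinv⟩
    | none =>
      cases hdg : dget d c with
      | none => exact ⟨seen, by simp [countA, hsc, hdg, Vv_leaf d c hdg], hinv⟩
      | some ch => exact absurd (meas_pos_of_key d c ch hdg) (by omega)
  | succ r ih =>
    intro c n seen hc hr hn hinv
    obtain ⟨n', rfl⟩ : ∃ n', n = n' + 1 := ⟨n - 1, by omega⟩
    cases hsc : seen.get? c with
    | some v =>
      exact ⟨seen, by simp [countA, hsc, (hinv c v hsc).2], hinv⟩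
    | none =>
      cases hdg : dget d c with
      | none => exact ⟨seen, by simp [countA, hsc, hdg, Vv_leaf d c hdg], hinv⟩
      | some ch =>
        by_cases hch : ch = []
        · exact ⟨seen, by simp [countA, hsc, hdg, hch, Vv_nil d c (hch ▸ hdg)], hinv⟩
        · have hloop : ∀ l, (∀ p ∈ l, p ∈ ch) → ∀ t seen₀, InvSeen d seen₀ →
              ∃ seen', loopA d n' seen₀ l t =
                some (l.foldl (fun t p => t + p.1 * bumpB (Vv d p.2)) t, seen') ∧
                InvSeen d seen' := by
            intro l
            induction l with
            | nil => intro _ t seen₀ hinv₀; exact ⟨seen₀, by simp [loopA], hinv₀⟩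
            | cons p rest ihl =>
              intro hl t seen₀ hinv₀
              have hpr := meas_child_lt d hpre c hc ch hdg p (hl p (by simp))
              obtain ⟨seen₁, hA, hinv₁⟩ :=
                ih p.2 n' seen₀ (child_mem_clF d _ c hc ch hdg p (hl p (by simp)))
                  (by omega) (by omega) hinv₀
              obtain ⟨seen', hA', hinv'⟩ :=
                ihl (fun q hq => hl q (by simp [hq])) (t + p.1 * bumpB (Vv d p.2)) seen₁ hinv₁
              refine ⟨seen', ?_, hinv'⟩
              simp only [loopA, hA, bumpB] at hA' ⊢
              exact hA'
          obtain ⟨seen', hA, hinv'⟩ := hloop ch (fun p hp => hp) 0 seen hinv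
          refine ⟨seen'.insert c (Vv d c), ?_, ?_⟩
          · rw [Vv_key d hpre c hc ch hdg hch]
            simp [countA, hsc, hdg, hch, hA]
          · intro c' v' hget
            rw [PySem.Dict.get?_insert] at hget
            by_cases hcc : c' = c
            · subst hcc
              rw [if_pos rfl] at hget
              cases hget
              exact ⟨hc, rfl⟩
            · rw [if_neg hcc] at hget
              exact hinv' c' v' hget

-- ===== B side =====

theorem foldl_insert_get? (d : List (String × List (Int × String)))
    (val : PySem.Dict String Int) :
    ∀ (L : List (String × List (Int × String))) (acc : PySem.Dict String Int) (c : String),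
    (L.map Prod.fst).Nodup →
    (L.foldl (fun nw p => nw.insert p.1 (rowB d val p.2)) acc).get? c
      = match (PySem.Dict.mk L).get? c with
        | some ch => some (rowB d val ch)
        | none => acc.get? c := by
  intro L
  induction L with
  | nil =>
    intro acc c _
    rw [show (PySem.Dict.mk ([] : List (String × List (Int × String)))).get? c = none from
      (PySem.Dict.get?_eq_none_iff_not_mem_keys _ _).mpr (by simp [PySem.Dict.keys])]
    rfl
  | cons e rest ih =>
    intro acc c hnd
    rw [List.map_cons, List.nodup_cons] at hnd
    simp only [List.foldl_cons]
    rw [ih (acc.insert e.1 (rowB d val e.2)) c hnd.2, PySem.Dict.get?_mk_cons]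
    by_cases hec : e.1 = c
    · subst hec
      have hnone : (PySem.Dict.mk rest).get? e.1 = none :=
        (PySem.Dict.get?_eq_none_iff_not_mem_keys _ _).mpr
          (by simpa [PySem.Dict.keys] using hnd.1)
      rw [hnone]
      simp [PySem.Dict.get?_insert_self]
    · rw [show (e.1 == c) = false by simpa using hec]
      simp only [Bool.false_eq_true, if_neg, not_false_iff]
      cases h2 : (PySem.Dict.mk rest).get? c with
      | some ch => rfl
      | none => exact PySem.Dict.get?_insert_of_ne acc (rowB d val e.2) (fun h => hec h.symm)

theorem sweep_get (d : List (String × List (Int × String))) (hnd : (d.map Prod.fst).Nodup)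
    (val : PySem.Dict String Int) (c : String) :
    (sweepB d val).get? c
      = match dget d c with
        | some ch => some (rowB d val ch)
        | none => none := by
  unfold sweepB dget
  rw [foldl_insert_get? d val d PySem.Dict.empty c hnd]
  cases (PySem.Dict.mk d).get? c with
  | some ch => rfl
  | none => simp [PySem.Dict.get?_empty]

theorem B_main (d : List (String × List (Int × String))) (hpre : Pre_solve d) :
    ∀ s c ch, c ∈ ReachS d → dget d c = some ch → ch ≠ [] → mC d c ≤ s →
      (iterSweep d s).get? c = some (Vv d c) := by
  intro s
  induction s with
  | zero =>
    intro c ch _ hdg _ hs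
    exact absurd (meas_pos_of_key d c ch hdg) (by omega)
  | succ s ih =>
    intro c ch hc hdg hch hs
    show (sweepB d (iterSweep d s)).get? c = some (Vv d c)
    rw [sweep_get d hpre.1 (iterSweep d s) c, hdg]
    show some (rowB d (iterSweep d s) ch) = some (Vv d c)
    have hrow : rowB d (iterSweep d s) ch
        = ch.foldl (fun t p => t + p.1 * bumpB (Vv d p.2)) 0 := by
      unfold rowB
      apply PySem.List.foldl_congr_mem
      intro t p hp
      have hcv : childValB d (iterSweep d s) p.2 = Vv d p.2 := by
        unfold childValB
        cases hdg2 : dget d p.2 with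
        | none => simp [Vv_leaf d p.2 hdg2]
        | some ch2 =>
          by_cases hch2 : ch2 = []
          · simp [hch2, Vv_nil d p.2 (hch2 ▸ hdg2)]
          · have hlt := meas_child_lt d hpre c hc ch hdg p hp
            have hB := ih p.2 ch2 (child_mem_clF d _ c hc ch hdg p hp) hdg2 hch2 (by omega)
            simp [hch2, PySem.Dict.getD_eq_get?_getD, hB]
      rw [hcv]
    rw [hrow, ← Vv_key d hpre c hc ch hdg hch]

-- ===== VERDICT (by name: the statements are the Claim_ definitions above) =====

theorem solve_spec : Claim_equal_solve := by
  intro d _ hpre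
  unfold Spec_solve solve solve_alt
  have hsg : ("shiny gold" : String) ∈ ReachS d :=
    subset_clF d _ (Finset.mem_singleton_self _)
  cases hdg : dget d "shiny gold" with
  | none =>
    simp [countA, PySem.Dict.get?_empty, hdg]
  | some ch =>
    by_cases hch : ch = []
    · subst hch
      simp [countA, PySem.Dict.get?_empty, hdg]
    · have hinv : InvSeen d PySem.Dict.empty := by
        intro c v hget
        rw [PySem.Dict.get?_empty] at hget
        simp at hget
      have hm := meas_le d "shiny gold"
      obtain ⟨seen', hA, _⟩ :=
        A_main d hpre (mC d "shiny gold") "shiny gold" (d.length + 1) PySem.Dict.empty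
          hsg (le_refl _) (by omega) hinv
      have hB := B_main d hpre d.length "shiny gold" ch hsg hdg hch hm
      rw [hA]
      show Vv d "shiny gold" + 76
          = (if ch = [] then 1 else (iterSweep d d.length).getD "shiny gold" 0) + 76
      rw [if_neg hch, PySem.Dict.getD_eq_get?_getD, hB]
      rfl
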